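-- pv_equiv track=rewrite | github.com/MrBrantCode/unitest_baseline | mut_generate/mist_train_cf/cf_78316/solution.py | inverse_even_characters
-- ===== SOURCE A (Python) =====
-- def inverse_even_characters(s: str):
--     even_chars = [s[i] for i in range(len(s)) if i % 2 == 0]
--     reversed_even = even_chars[::-1]
--     result = ''
--     j = 0
--     for i in range(len(s)):
--         if i % 2 == 0:
--             result += reversed_even[j]
--             j += 1
--         else:
--             result += s[i]
--     return result
-- ===== SOURCE B (Python) =====
-- def inverse_even_characters(s: str):
--     n = len(s)
--     top = n - 1 if n % 2 else n - 2  # largest even index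
--     return ''.join(s[top - i] if i % 2 == 0 else s[i] for i in range(n))
-- ===== Notes on version B (the rewrite author's own statement) =====
-- stated objective: simpler
-- what changed: B replaces A's three-phase pipeline (collect even-indexed chars, slice-reverse them, rebuild the string with a parity counter j) by a single closed-form index map joined once: result[i] = s[top-i] for even i (top = largest even index) and s[i] for odd i; one pass and one join instead of an auxiliary list, a reversal and repeated string concatenation.
import Mathlib
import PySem

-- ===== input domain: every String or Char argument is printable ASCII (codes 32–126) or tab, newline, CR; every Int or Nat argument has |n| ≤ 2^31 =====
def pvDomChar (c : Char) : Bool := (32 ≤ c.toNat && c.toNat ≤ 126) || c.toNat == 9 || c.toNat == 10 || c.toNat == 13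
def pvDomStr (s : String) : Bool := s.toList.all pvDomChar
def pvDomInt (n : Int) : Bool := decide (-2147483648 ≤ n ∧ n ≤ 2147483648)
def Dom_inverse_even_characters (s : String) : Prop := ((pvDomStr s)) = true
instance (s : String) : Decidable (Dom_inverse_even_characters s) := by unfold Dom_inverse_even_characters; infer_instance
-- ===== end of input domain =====

-- B replaces A's collect/slice-reverse/rebuild-with-counter pipeline by one closed-form
-- index map (result[i] = s[top-i] for even i, s[i] for odd i); objective: simpler.

-- ===== PORT A =====
-- even_chars = [s[i] for i in range(len(s)) if i % 2 == 0]
-- (s[i] with i drawn from range(len(s)) is always in range, so pyGetD's ' ' default is never used)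
def pvAEvens (cs : List Char) : List Char :=
  ((PySem.List.pyRange 0 (cs.length : Int) 1).filter (fun i => PySem.Int.mod i 2 == 0)).map
    (fun i => PySem.List.pyGetD cs i ' ')

-- the 'for i in range(len(s))' loop accumulating (result, j)
def pvALoop (cs rev : List Char) : List Char × Int :=
  (PySem.List.pyRange 0 (cs.length : Int) 1).foldl
    (fun st i => if PySem.Int.mod i 2 == 0
      then (st.1 ++ [PySem.List.pyGetD rev st.2 ' '], st.2 + 1)
      else (st.1 ++ [PySem.List.pyGetD cs i ' '], st.2)) ([], 0)

def inverse_even_characters (s : String) : String :=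
  -- reversed_even = even_chars[::-1]
  String.mk (pvALoop s.toList
    ((PySem.List.slice? (pvAEvens s.toList) none none (-1)).getD [])).1

-- ===== PORT B =====
-- top = n - 1 if n % 2 else n - 2   (largest even index)
def pvBTop (n : Int) : Int := if PySem.Int.mod n 2 == 0 then n - 2 else n - 1

-- ''.join(s[top - i] if i % 2 == 0 else s[i] for i in range(n)); indices always in range
def inverse_even_characters_alt (s : String) : String :=
  String.mk ((PySem.List.pyRange 0 (s.toList.length : Int) 1).map (fun i =>
    if PySem.Int.mod i 2 == 0
      then PySem.List.pyGetD s.toList (pvBTop (s.toList.length : Int) - i) ' '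
      else PySem.List.pyGetD s.toList i ' '))

-- ===== PRECONDITION & SPEC =====
def Spec_inverse_even_characters (s : String) (out : String) : Prop := out = inverse_even_characters_alt s
instance (s : String) (out : String) : Decidable (Spec_inverse_even_characters s out) := by unfold Spec_inverse_even_characters; infer_instance

-- ===== CLAIM (what is proved, stated in full; the proofs are below) =====
def Claim_equal_inverse_even_characters : Prop := ∀ (s : String), Dom_inverse_even_characters s → Spec_inverse_even_characters s (inverse_even_characters s)

-- ===== LEMMAS AND PROOFS =====

-- even indices below n, in order
lemma pv_filter_even_range (n : Nat) :
    (List.range n).filter (fun i => i % 2 == 0) = (List.range ((n+1)/2)).map (fun j => 2*j) := by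
  induction n with
  | zero => rfl
  | succ n ih =>
    rcases Nat.mod_two_eq_zero_or_one n with h | h
    · have h2 : (n+1+1)/2 = (n+1)/2 + 1 := by omega
      have hn : 2 * ((n+1)/2) = n := by omega
      rw [List.range_succ, List.filter_append, ih, h2, List.range_succ, List.map_append]
      simp [h, hn]
    · have h2 : (n+1+1)/2 = (n+1)/2 := by omega
      rw [List.range_succ, List.filter_append, ih, h2]
      simp [h]

lemma pv_evens_eq (cs : List Char) :
    pvAEvens cs = (List.range ((cs.length+1)/2)).map (fun j => cs.getD (2*j) ' ') := by
  unfold pvAEvens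
  rw [PySem.List.pyRange_zero_natCast, List.filter_map]
  have hp : (fun i : Nat => PySem.Int.mod ((Nat.cast : Nat → Int) i) 2 == 0) = (fun i : Nat => i % 2 == 0) := by
    funext i
    rw [show ((2:Int)) = ((2:Nat):Int) by norm_num, PySem.Int.mod_natCast]
    rcases Nat.mod_two_eq_zero_or_one i with h | h <;> simp [h]
  rw [show ((fun i => PySem.Int.mod i 2 == 0) ∘ (Nat.cast : Nat → Int)) = (fun i : Nat => i % 2 == 0) from hp,
      pv_filter_even_range, List.map_map, List.map_map]
  refine List.map_congr_left fun j _ => ?_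
  exact PySem.List.pyGetD_natCast cs (2*j) ' '

-- loop invariant for A's rebuild loop
lemma pv_loop_inv (cs rev : List Char) (m : Nat) :
    (((List.range m).map (Nat.cast : Nat → Int)).foldl
      (fun st i => if PySem.Int.mod i 2 == 0
        then (st.1 ++ [PySem.List.pyGetD rev st.2 ' '], st.2 + 1)
        else (st.1 ++ [PySem.List.pyGetD cs i ' '], st.2)) (([], 0) : List Char × Int))
    = ((List.range m).map (fun i => if i % 2 = 0 then rev.getD (i/2) ' ' else cs.getD i ' '),
       (((m+1)/2 : Nat) : Int)) := by
  induction m with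
  | zero => simp
  | succ m ih =>
    rw [List.range_succ, List.map_append, List.foldl_append, ih, List.map_cons, List.map_nil,
        List.foldl_cons, List.foldl_nil]
    have hmod : PySem.Int.mod (m:Int) 2 = ((m % 2 : Nat) : Int) := by
      exact_mod_cast PySem.Int.mod_natCast m 2
    rcases Nat.mod_two_eq_zero_or_one m with h | h
    · have hd : (2:Int) ∣ (m:Int) := by exact_mod_cast Nat.dvd_of_mod_eq_zero h
      have e1 : ((m+1)/2 : Nat) = m/2 := by omega
      have e2 : ((m+1+1)/2 : Nat) = m/2 + 1 := by omega
      simp [h, hd, e1, e2, List.getD]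
      rw [show ((m:Int)/2) = ((m/2 : Nat) : Int) by omega, PySem.List.pyGetD_natCast]
      rfl
    · have hd : ¬ ((2:Int) ∣ (m:Int)) := by omega
      have e2 : ((m+1+1)/2 : Nat) = (m+1)/2 := by omega
      simp [h, hd, e2, List.getD]

lemma pv_core (cs : List Char) :
    (pvALoop cs ((PySem.List.slice? (pvAEvens cs) none none (-1)).getD [])).1
    = (PySem.List.pyRange 0 (cs.length : Int) 1).map (fun i =>
        if PySem.Int.mod i 2 == 0
          then PySem.List.pyGetD cs (pvBTop (cs.length : Int) - i) ' '
          else PySem.List.pyGetD cs i ' ') := by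
  have hrev : (PySem.List.slice? (pvAEvens cs) none none (-1)).getD [] = (pvAEvens cs).reverse := by
    rw [PySem.List.slice?_none_none_neg_one]; rfl
  unfold pvALoop
  rw [hrev, PySem.List.pyRange_zero_natCast, pv_loop_inv, List.map_map]
  refine List.map_congr_left fun i hi => ?_
  rw [List.mem_range] at hi
  have hmodi : PySem.Int.mod (i:Int) 2 = ((i % 2 : Nat) : Int) := by
    exact_mod_cast PySem.Int.mod_natCast i 2
  have hmodn : PySem.Int.mod (cs.length:Int) 2 = ((cs.length % 2 : Nat) : Int) := by
    exact_mod_cast PySem.Int.mod_natCast cs.length 2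
  rcases Nat.mod_two_eq_zero_or_one i with h | h
  · -- even index: rev[i/2] = cs[top - i]
    have hd : (2:Int) ∣ (i:Int) := by exact_mod_cast Nat.dvd_of_mod_eq_zero h
    have hk : i / 2 < (cs.length+1)/2 := by omega
    have hlen : ((List.range ((cs.length+1)/2)).map (fun j => cs.getD (2*j) ' ')).length = (cs.length+1)/2 := by
      simp
    have hL : ((pvAEvens cs).reverse.getD (i/2) ' ')
        = cs.getD (2 * ((cs.length+1)/2 - 1 - i/2)) ' ' := by
      rw [pv_evens_eq, List.getD_eq_getElem _ _ (by simpa using hk),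
          List.getElem_reverse, List.getElem_map, List.getElem_range]
      simp
    have ht : pvBTop (cs.length:Int) - (i:Int) = (((if cs.length % 2 = 0 then cs.length-2 else cs.length-1) - i : Nat) : Int) := by
      unfold pvBTop
      rw [hmodn]
      rcases Nat.mod_two_eq_zero_or_one cs.length with hh | hh <;> simp [hh] <;> omega
    have harith : 2 * ((cs.length+1)/2 - 1 - i/2) = (if cs.length % 2 = 0 then cs.length-2 else cs.length-1) - i := by
      rcases Nat.mod_two_eq_zero_or_one cs.length with hh | hh <;> simp [hh] <;> omega
    simp only [Function.comp, hmodi, h, ht, hd] at *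
    rw [PySem.List.pyGetD_natCast]
    simp only [List.getD] at hL ⊢
    simp [harith.symm, hL]
  · have hd : ¬ ((2:Int) ∣ (i:Int)) := by omega
    simp [Function.comp, h, hd, List.getD]
-- ===== VERDICT (by name: the statement is the Claim_ definition above) =====
theorem inverse_even_characters_spec : Claim_equal_inverse_even_characters := by
  intro s _
  unfold Spec_inverse_even_characters inverse_even_characters inverse_even_characters_alt
  exact congrArg String.mk (pv_core s.toList)
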